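-- pv_equiv track=rewrite | github.com/AlekSt7/haxtts-server | app/text_splitter.py | combine_into_parts
-- ===== SOURCE A (Python) =====
-- def combine_into_parts(sentences: list[str], parts_count: int) -> list[str]:
--     """
--     Combines sentences into text parts so that the number of text parts matches the number passed in parts_count
--
--     :param sentences: sentences that will be combined into text parts
--     :type sentences: list[str]
--
--     :param parts_count: number of parts of text
--     :type parts_count: int
--
--     :return: list of text parts
--     :rtype: list[str]
--     """
--
--     # Sentences size
--     total_sentences = len(sentences)
--
--     # Calculate size of each part
--     part_size = total_sentences // parts_count
--     remainder = total_sentences % parts_count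
--
--     # Create list for parts
--     result: list[str] = list()
--     start_index = 0
--
--     for i in range(parts_count):
--         # Determine the size of the current part
--         current_part_size = part_size + (1 if i < remainder else 0)
--         end_index = start_index + current_part_size
--
--         part = ' '.join(sentences[start_index:end_index])
--
--         # Add a part to the result
--         result.append(part)
--
--         # Updating the index for the next part
--         start_index = end_index
--
--     return result
-- ===== SOURCE B (Python) =====
-- def combine_into_parts(sentences: list[str], parts_count: int) -> list[str]:
--     # Scatter pass: assign each sentence to one of parts_count preallocated
--     # buckets, moving to the next bucket once the current one is full.
--     part_size = len(sentences) // parts_count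
--     remainder = len(sentences) % parts_count
--     groups: list[list[str]] = [[] for _ in range(parts_count)]
--     gi = 0
--     for sentence in sentences:
--         while gi < len(groups) and len(groups[gi]) >= part_size + (1 if gi < remainder else 0):
--             gi += 1
--         groups[gi].append(sentence)
--     return [' '.join(g) for g in groups]
-- ===== Notes on version B (the rewrite author's own statement) =====
-- stated objective: alternative
-- what changed: Replaced the loop over parts that slices sentences[start:end] with accumulated indices by a single forward scatter pass over the sentences that appends each sentence into one of parts_count preallocated buckets, advancing to the next bucket once the current one reaches its target size, then joins each bucket.
-- outside the precondition, e.g. on combine_into_parts(['a'], -1): A returns [], B raises IndexError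
import Mathlib
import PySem

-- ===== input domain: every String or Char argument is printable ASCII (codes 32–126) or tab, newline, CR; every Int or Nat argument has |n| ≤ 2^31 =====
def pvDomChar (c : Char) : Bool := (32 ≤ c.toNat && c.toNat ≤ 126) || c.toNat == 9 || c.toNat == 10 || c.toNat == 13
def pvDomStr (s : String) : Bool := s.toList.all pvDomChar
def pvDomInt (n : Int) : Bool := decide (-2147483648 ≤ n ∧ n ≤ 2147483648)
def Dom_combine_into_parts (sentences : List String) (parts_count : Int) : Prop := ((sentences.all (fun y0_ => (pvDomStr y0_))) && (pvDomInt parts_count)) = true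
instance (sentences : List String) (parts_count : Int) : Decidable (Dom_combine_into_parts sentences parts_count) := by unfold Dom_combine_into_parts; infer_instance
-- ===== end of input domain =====

-- B replaces A's loop-over-parts slicing (accumulated start/end indices) by a single forward
-- scatter pass that drops each sentence into one of parts_count preallocated buckets; same cost,
-- alternative decomposition.


-- ===== PORT A =====
def combine_into_parts (sentences : List String) (parts_count : Int) : List String :=
  let total : Int := PySem.List.len sentences
  let part_size : Int := PySem.Int.floordiv total parts_count
  let remainder : Int := PySem.Int.mod total parts_count
  -- for i in range(parts_count): state = (result, start_index)
  let st := (PySem.List.pyRange 0 parts_count 1).foldl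
    (fun (st : List String × Int) i =>
      let current_part_size := part_size + (if i < remainder then 1 else 0)
      let end_index := st.2 + current_part_size
      let part := PySem.Str.join " " (PySem.List.slice sentences (some st.2) (some end_index))
      (st.1 ++ [part], end_index))
    ([], 0)
  st.1

-- ===== PORT B =====
-- the while-loop advancing gi past full buckets (condition evaluated exactly as in Python)
def cipAdvance (groups : List (List String)) (part_size remainder : Int) (gi : Nat) : Nat :=
  if h : gi < groups.length ∧ part_size + (if (gi : Int) < remainder then 1 else 0) ≤ ((groups.getD gi []).length : Int) then
    cipAdvance groups part_size remainder (gi + 1)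
  else gi
termination_by groups.length - gi
decreasing_by omega

def combine_into_parts_alt (sentences : List String) (parts_count : Int) : List String :=
  let part_size : Int := PySem.Int.floordiv (PySem.List.len sentences) parts_count
  let remainder : Int := PySem.Int.mod (PySem.List.len sentences) parts_count
  let groups0 : List (List String) := (PySem.List.pyRange 0 parts_count 1).map (fun _ => [])
  let st := sentences.foldl
    (fun (st : List (List String) × Nat) sentence =>
      let gi := cipAdvance st.1 part_size remainder st.2
      (st.1.set gi (st.1.getD gi [] ++ [sentence]), gi))
    (groups0, 0)
  st.1.map (fun g => PySem.Str.join " " g)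

-- ===== PRECONDITION & SPEC =====
-- Pre_ excludes parts_count == 0, where A raises ZeroDivisionError (and B does too), and
-- negative parts_count with nonempty sentences, where A's range over a negative bound
-- accidentally returns [] silently dropping every sentence while B raises IndexError.
def Pre_combine_into_parts (sentences : List String) (parts_count : Int) : Prop :=
  0 < parts_count ∨ (parts_count < 0 ∧ sentences = [])
instance (sentences : List String) (parts_count : Int) : Decidable (Pre_combine_into_parts sentences parts_count) := by unfold Pre_combine_into_parts; infer_instance

def pvWitness_combine_into_parts : List String × Int := (["a", "b", "c"], 2)

def Spec_combine_into_parts (sentences : List String) (parts_count : Int) (out : List String) : Prop := out = combine_into_parts_alt sentences parts_count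
instance (sentences : List String) (parts_count : Int) (out : List String) : Decidable (Spec_combine_into_parts sentences parts_count out) := by unfold Spec_combine_into_parts; infer_instance

-- ===== CLAIM (what is proved, stated in full; the proofs are below) =====
def Claim_equal_combine_into_parts : Prop := ∀ (sentences : List String) (parts_count : Int), Dom_combine_into_parts sentences parts_count → Pre_combine_into_parts sentences parts_count → Spec_combine_into_parts sentences parts_count (combine_into_parts sentences parts_count)

-- ===== LEMMAS AND PROOFS =====

-- target size of bucket i and start offset of bucket i, in Nat arithmetic
def cipTgt (ps r i : Nat) : Nat := ps + (if i < r then 1 else 0)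
def cipOff (ps r i : Nat) : Nat := i * ps + min i r

-- the chunk both programs assign to part i
def cipPart (xs : List String) (ps r i : Nat) : List String :=
  (xs.drop (cipOff ps r i)).take (cipTgt ps r i)

-- bucket i of B's state after the first j sentences have been scattered
def cipPartAt (xs : List String) (ps r j i : Nat) : List String :=
  (xs.drop (cipOff ps r i)).take (min (cipTgt ps r i) (j - cipOff ps r i))

lemma cipOff_succ (ps r i : Nat) : cipOff ps r (i + 1) = cipOff ps r i + cipTgt ps r i := by
  simp only [cipOff, cipTgt, Nat.succ_mul]; split_ifs with h <;> omega

lemma cipOff_mono (ps r : Nat) {i j : Nat} (h : i ≤ j) : cipOff ps r i ≤ cipOff ps r j := by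
  simp only [cipOff]
  have : i * ps ≤ j * ps := Nat.mul_le_mul_right _ h
  omega

lemma cip_set_map_range {α : Type} (f : Nat → α) (P b : Nat) (v : α) :
    ((List.range P).map f).set b v = (List.range P).map (fun i => if i = b then v else f i) := by
  apply List.ext_getElem?
  intro k
  rcases eq_or_ne k b with rfl | hb
  · by_cases hk : k < P <;> simp [hk]
  · by_cases hk : k < P
    · have h1 : k < ((List.range P).map f).length := by simp [hk]
      rw [List.getElem?_eq_getElem (by simpa using h1), List.getElem?_eq_getElem (by simp [hk])]
      rw [List.getElem_set_ne (by omega)]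
      simp [hb]
    · rw [List.getElem?_eq_none (by simp; omega), List.getElem?_eq_none (by simp; omega)]

lemma cip_getD_map_range {α : Type} [Inhabited α] (f : Nat → α) (P b : Nat) (hb : b < P) (d : α) :
    ((List.range P).map f).getD b d = f b := by
  simp [List.getD_eq_getElem?_getD, hb]

lemma cipAdvance_spec (xs : List String) (ps r P j : Nat)
    (hlen : xs.length = cipOff ps r P) (hj : j < xs.length) :
    ∀ k g, g + k = P → cipOff ps r g ≤ j →
      ∃ b, cipAdvance ((List.range P).map (cipPartAt xs ps r j)) (ps : Int) (r : Int) g = b ∧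
        g ≤ b ∧ b < P ∧ cipOff ps r b ≤ j ∧ j < cipOff ps r (b + 1) ∧
        (∀ i, g ≤ i → i < b → cipOff ps r (i + 1) ≤ j) := by
  intro k
  induction k with
  | zero =>
    intro g hg hge
    exfalso
    have : g = P := by omega
    subst this
    omega
  | succ k ih =>
    intro g hg hge
    have hgP : g < P := by omega
    have hgetD : ((List.range P).map (cipPartAt xs ps r j)).getD g [] = cipPartAt xs ps r j g :=
      cip_getD_map_range _ _ _ hgP _
    have hlen' : (cipPartAt xs ps r j g).length = min (cipTgt ps r g) (j - cipOff ps r g) := by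
      simp only [cipPartAt, List.length_take, List.length_drop]
      omega
    have hs := cipOff_succ ps r g
    have key : ((ps : Int) + (if (g : Int) < (r : Int) then 1 else 0) ≤
        (((List.range P).map (cipPartAt xs ps r j)).getD g []).length) ↔ cipOff ps r (g + 1) ≤ j := by
      rw [hgetD, hlen']
      simp only [Nat.cast_lt, cipTgt] at hs ⊢
      split_ifs with hgr
      · rw [if_pos hgr] at hs; push_cast; omega
      · rw [if_neg hgr] at hs; push_cast; omega
    rw [cipAdvance]
    by_cases hfull : cipOff ps r (g + 1) ≤ j
    · rw [dif_pos ⟨by simpa using hgP, key.mpr hfull⟩]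
      obtain ⟨b, hb, h1, h2, h3, h4, h5⟩ := ih (g + 1) (by omega) hfull
      refine ⟨b, hb, by omega, h2, h3, h4, fun i hgi hib => ?_⟩
      rcases eq_or_lt_of_le hgi with rfl | hlt
      · exact hfull
      · exact h5 i hlt hib
    · rw [dif_neg ?_]
      · exact ⟨g, rfl, le_refl g, hgP, hge, by omega, fun i h1 h2 => by omega⟩
      · rintro ⟨-, hle⟩
        exact hfull (key.mp hle)

lemma cipPartAt_push (xs : List String) (ps r j i : Nat) (hj : j < xs.length)
    (h1 : cipOff ps r i ≤ j) (h2 : j < cipOff ps r (i + 1)) :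
    cipPartAt xs ps r (j + 1) i = cipPartAt xs ps r j i ++ [xs[j]] := by
  have hs := cipOff_succ ps r i
  simp only [cipPartAt]
  rw [show min (cipTgt ps r i) (j + 1 - cipOff ps r i) = (j - cipOff ps r i) + 1 by omega,
      show min (cipTgt ps r i) (j - cipOff ps r i) = j - cipOff ps r i by omega]
  rw [List.take_add_one]
  congr 1
  rw [List.getElem?_drop, show cipOff ps r i + (j - cipOff ps r i) = j by omega,
      List.getElem?_eq_getElem hj]
  rfl

lemma cipPartAt_stable (xs : List String) (ps r j i : Nat)
    (h : cipOff ps r (i + 1) ≤ j ∨ j < cipOff ps r i) :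
    cipPartAt xs ps r (j + 1) i = cipPartAt xs ps r j i := by
  have hs := cipOff_succ ps r i
  simp only [cipPartAt]
  congr 1
  omega

lemma cipFoldA (xs : List String) (ps r : Nat) : ∀ m : Nat,
    (PySem.List.pyRange 0 (m : Int) 1).foldl
      (fun (st : List String × Int) i =>
        (st.1 ++ [PySem.Str.join " " (PySem.List.slice xs (some st.2)
            (some (st.2 + ((ps : Int) + (if i < (r : Int) then 1 else 0)))))],
         st.2 + ((ps : Int) + (if i < (r : Int) then 1 else 0))))
      ([], 0)
    = ((List.range m).map (fun i => PySem.Str.join " " (cipPart xs ps r i)), (cipOff ps r m : Int)) := by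
  intro m
  induction m with
  | zero =>
    rw [show ((0 : Nat) : Int) = 0 by norm_num, PySem.List.pyRange_one_eq_nil (by norm_num)]
    simp [cipOff]
  | succ m ih =>
    rw [show ((m + 1 : Nat) : Int) = (m : Int) + 1 by push_cast; ring,
        PySem.List.pyRange_one_succ_right (by positivity), List.foldl_append, ih]
    simp only [List.foldl_cons, List.foldl_nil]
    have htgt : ((ps : Int) + (if (m : Int) < (r : Int) then 1 else 0)) = (cipTgt ps r m : Int) := by
      simp only [cipTgt, Nat.cast_lt]
      split_ifs <;> push_cast <;> ring
    rw [htgt, PySem.List.slice_natCast_add]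
    rw [List.range_succ, List.map_append]
    refine Prod.ext ?_ ?_
    · simp [cipPart]
    · simp only
      rw [cipOff_succ]
      push_cast
      ring

lemma cipFoldB (xs : List String) (ps r P : Nat) (hlen : xs.length = cipOff ps r P) :
    ∀ j, j ≤ xs.length → ∃ g,
      (xs.take j).foldl
        (fun (st : List (List String) × Nat) sentence =>
          (st.1.set (cipAdvance st.1 (ps : Int) (r : Int) st.2)
             (st.1.getD (cipAdvance st.1 (ps : Int) (r : Int) st.2) [] ++ [sentence]),
           cipAdvance st.1 (ps : Int) (r : Int) st.2))
        ((List.range P).map (fun _ => []), 0)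
      = ((List.range P).map (cipPartAt xs ps r j), g) ∧ g ≤ P ∧ cipOff ps r g ≤ j ∧
        (∀ i, i < g → cipOff ps r (i + 1) ≤ j) := by
  intro j
  induction j with
  | zero =>
    intro _
    refine ⟨0, ?_, by omega, by simp [cipOff], fun i hi => by omega⟩
    rw [List.take_zero, List.foldl_nil]
    refine Prod.ext ?_ rfl
    simp only
    refine List.map_congr_left (fun i _ => ?_)
    simp [cipPartAt]
  | succ j ih =>
    intro hj1
    have hj : j < xs.length := by omega
    obtain ⟨g, hfold, hgP, hoffg, hprev⟩ := ih (le_of_lt hj)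
    obtain ⟨b, hbeq, hgb, hbP, hoffb, hjb, hmid⟩ :=
      cipAdvance_spec xs ps r P j hlen hj (P - g) g (by omega) hoffg
    refine ⟨b, ?_, by omega, by omega, fun i hi => ?_⟩
    · rw [List.take_add_one, List.getElem?_eq_getElem hj]
      simp only [Option.toList_some]
      rw [List.foldl_append, hfold, List.foldl_cons, List.foldl_nil]
      simp only [hbeq]
      refine Prod.ext ?_ rfl
      simp only
      rw [cip_getD_map_range _ _ _ hbP, cip_set_map_range]
      refine List.map_congr_left (fun i hi => ?_)
      rcases eq_or_ne i b with rfl | hne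
      · rw [if_pos rfl, cipPartAt_push xs ps r j i hj hoffb hjb]
      · rw [if_neg hne]
        rcases Nat.lt_or_ge i b with hlt | hge
        · refine (cipPartAt_stable xs ps r j i (Or.inl ?_)).symm
          rcases Nat.lt_or_ge i g with hig | hig
          · exact hprev i hig
          · exact hmid i hig hlt
        · refine (cipPartAt_stable xs ps r j i (Or.inr ?_)).symm
          have : cipOff ps r (b + 1) ≤ cipOff ps r i := cipOff_mono ps r (by omega)
          omega
    · rcases Nat.lt_or_ge i g with hig | hig
      · have := hprev i hig; omega
      · have := hmid i hig hi; omega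

-- ===== VERDICT (by name: the statement is the Claim_ definition above) =====
theorem combine_into_parts_spec : Claim_equal_combine_into_parts := by
  intro xs p _ hpre
  unfold Spec_combine_into_parts
  rcases hpre with hp | ⟨hneg, rfl⟩
  · -- 0 < parts_count
    obtain ⟨P, rfl⟩ : ∃ P : Nat, p = (P : Int) := ⟨p.toNat, (Int.toNat_of_nonneg hp.le).symm⟩
    have hP0 : 0 < P := by exact_mod_cast hp
    have h1 : P * (xs.length / P) + xs.length % P = xs.length := Nat.div_add_mod xs.length P
    have h2 : xs.length % P < P := Nat.mod_lt _ hP0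
    have hlen : xs.length = cipOff (xs.length / P) (xs.length % P) P := by
      simp only [cipOff]; omega
    simp only [combine_into_parts, combine_into_parts_alt, PySem.List.len_eq,
      PySem.Int.floordiv_natCast, PySem.Int.mod_natCast]
    rw [cipFoldA xs (xs.length / P) (xs.length % P) P]
    have hg0 : (PySem.List.pyRange 0 (P : Int) 1).map (fun _ => ([] : List String)) =
        (List.range P).map (fun _ => []) := by
      rw [PySem.List.pyRange_one, List.map_map]
      simp [Function.comp_def]
    rw [hg0]
    obtain ⟨g, hfold, -, -, -⟩ := cipFoldB xs (xs.length / P) (xs.length % P) P hlen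
      xs.length (le_refl _)
    rw [List.take_length] at hfold
    rw [hfold]
    simp only [List.map_map]
    refine List.map_congr_left (fun i hi => ?_)
    have hiP : i < P := List.mem_range.mp hi
    have hmono : cipOff (xs.length / P) (xs.length % P) (i + 1) ≤
        cipOff (xs.length / P) (xs.length % P) P := cipOff_mono _ _ (by omega)
    have hs := cipOff_succ (xs.length / P) (xs.length % P) i
    simp only [Function.comp_apply, cipPartAt, cipPart]
    congr 2
    omega
  · -- parts_count < 0 and sentences = []
    simp [combine_into_parts, combine_into_parts_alt, PySem.List.pyRange_one_eq_nil hneg.le]
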